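-- pv_equiv track=rewrite | github.com/rlagusgh0223/Algorithm | 240526/프로그래머스, 파괴되지 않은 건물.py | solution
-- ===== SOURCE A (Python) =====
-- def solution(board, skill):
--     answer = 0
--     # 누적합을 할 리스트(행, 열 모두 누적합 해야된다)
--     tmp = [[0]*(len(board[0])+1) for _ in range(len(board)+1)]
--
--     for t, r1, c1, r2, c2, d in skill:
--         tmp[r1][c1] += d if t==2 else -d
--         tmp[r1][c2+1] += d if t==1 else -d
--         tmp[r2+1][c1] += d if t==1 else -d
--         tmp[r2+1][c2+1] += d if t==2 else -d
--
--     # 행 누적합 계산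
--     for i in range(len(tmp)-1):
--         for j in range(len(tmp[i])-1):
--             tmp[i+1][j] += tmp[i][j]
--
--     # 열 누적합 계산
--     for j in range(len(tmp[0])-1):
--         for i in range(len(tmp)-1):
--             tmp[i][j+1] += tmp[i][j]
--
--     # board에 누적합 적용하고 파괴되지 않은 건물 계산
--     for i in range(len(board)):
--         for j in range(len(board[i])):
--             board[i][j] += tmp[i][j]
--             if board[i][j] > 0:
--                 answer += 1
--
--     return answer
-- ===== SOURCE B (Python) =====
-- def solution(board, skill):
--     # Mutates board in place like A; return value is the count of cells > 0.
--     for t, r1, c1, r2, c2, d in skill: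
--         v = d if t == 2 else -d
--         for i in range(r1, r2 + 1):
--             for j in range(c1, c2 + 1):
--                 board[i][j] += v
--     return sum(1 for row in board for x in row if x > 0)
-- ===== Notes on version B (the rewrite author's own statement) =====
-- stated objective: simpler
-- what changed: B drops A's 2D difference array and the two prefix-sum passes entirely: it applies each skill directly to every board cell inside its rectangle and then counts cells > 0 in one final pass (same in-place mutation of board; equal return value).
-- outside the precondition, e.g. on solution([[1, 1], [1, 1]], [[1, -1, 0, -1, 1, 1]]): A returns 4, B returns 2; on solution([[1, 1], [1]], [[1, 0, 0, 1, 1, 1]]): A returns 0, B raises IndexError; on solution([[1, 1], [1, 1]], [[3, 0, 0, 0, 0, 1]]): A returns 0, B returns 3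
import Mathlib
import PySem

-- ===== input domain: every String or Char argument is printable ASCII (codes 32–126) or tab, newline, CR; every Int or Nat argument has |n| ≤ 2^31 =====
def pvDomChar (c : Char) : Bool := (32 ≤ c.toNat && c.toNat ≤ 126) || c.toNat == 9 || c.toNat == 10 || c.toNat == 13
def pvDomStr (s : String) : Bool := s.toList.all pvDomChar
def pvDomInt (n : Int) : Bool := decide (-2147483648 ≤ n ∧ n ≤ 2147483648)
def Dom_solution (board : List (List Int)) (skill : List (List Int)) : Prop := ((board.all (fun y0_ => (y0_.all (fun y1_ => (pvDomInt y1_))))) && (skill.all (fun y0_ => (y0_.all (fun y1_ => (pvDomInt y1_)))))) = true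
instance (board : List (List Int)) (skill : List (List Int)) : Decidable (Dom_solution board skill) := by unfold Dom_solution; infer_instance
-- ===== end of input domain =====

-- B applies each skill directly to every board cell inside its rectangle (no difference array,
-- no prefix-sum passes) and counts cells > 0 in one pass: simpler, same return value.
-- Python A and B both mutate `board` in place identically; the equivalence proved here is about the return value.


-- ===== PORT A =====
-- The (n+1)×(m+1) scratch grid `tmp` is a list of rows, exactly as in Python.
-- `pvGet t i j` is `tmp[i][j]`; `pvAddAt t i j v` is `tmp[i][j] += v`.
def pvGet (t : List (List Int)) (i j : Nat) : Int := (t.getD i []).getD j 0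

def pvAddAt (t : List (List Int)) (i j : Nat) (v : Int) : List (List Int) :=
  t.set i ((t.getD i []).set j ((t.getD i []).getD j 0 + v))

-- `tmp[i][j] += v` with Python's Int indices (exact for the in-range non-negative indices Pre_ admits)
def pvAddAtI (t : List (List Int)) (i j : Int) (v : Int) : List (List Int) :=
  if 0 ≤ i ∧ 0 ≤ j then pvAddAt t i.toNat j.toNat v else t

-- one iteration of `for t, r1, c1, r2, c2, d in skill:` (a non-6 row makes Python raise; excluded by Pre_)
def pvASkillT (t : List (List Int)) (s : List Int) : List (List Int) :=
  match s with
  | [ty, r1, c1, r2, c2, d] =>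
    let t1 := pvAddAtI t r1 c1 (if ty = 2 then d else -d)
    let t2 := pvAddAtI t1 r1 (c2+1) (if ty = 1 then d else -d)
    let t3 := pvAddAtI t2 (r2+1) c1 (if ty = 1 then d else -d)
    pvAddAtI t3 (r2+1) (c2+1) (if ty = 2 then d else -d)
  | _ => t

def solution (board : List (List Int)) (skill : List (List Int)) : Int :=
  let n := board.length
  let m := (board.headD []).length
  let t0 := List.replicate (n+1) (List.replicate (m+1) (0 : Int))
  let t1 := skill.foldl pvASkillT t0
  -- for i in range(n): for j in range(m): tmp[i+1][j] += tmp[i][j]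
  let t2 := (List.range n).foldl (fun t (i : Nat) =>
    (List.range m).foldl (fun t (j : Nat) => pvAddAt t (i+1) j (pvGet t i j)) t) t1
  -- for j in range(m): for i in range(n): tmp[i][j+1] += tmp[i][j]
  let t3 := (List.range m).foldl (fun t (j : Nat) =>
    (List.range n).foldl (fun t (i : Nat) => pvAddAt t i (j+1) (pvGet t i j)) t) t2
  (List.range n).foldl (fun answer (i : Nat) =>
    let row := board.getD i []
    (List.range row.length).foldl (fun answer (j : Nat) =>
      if row.getD j 0 + pvGet t3 i j > 0 then answer + 1 else answer) answer) 0

-- ===== PORT B =====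
-- B mutates board cells directly; the board state is modelled as a function Int → Int → Int
-- (`pvBump h a b v` is `board[a][b] += v`; constant-v closures, evaluated directly).
def pvBump (g : Int → Int → Int) (a b v : Int) : Int → Int → Int :=
  fun x y => if x = a ∧ y = b then g x y + v else g x y

def pvBSkill (h : Int → Int → Int) (s : List Int) : Int → Int → Int :=
  match s with
  | [t, r1, c1, r2, c2, d] =>
    let v := if t = 2 then d else -d
    (PySem.List.pyRange r1 (r2+1) 1).foldl (fun h i =>
      (PySem.List.pyRange c1 (c2+1) 1).foldl (fun h j => pvBump h i j v) h) h
  | _ => h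

def solution_alt (board : List (List Int)) (skill : List (List Int)) : Int :=
  let h0 : Int → Int → Int := fun i j => (board.getD i.toNat []).getD j.toNat 0
  let h := skill.foldl pvBSkill h0
  (List.range board.length).foldl (fun acc (i : Nat) =>
    (List.range (board.getD i []).length).foldl (fun acc (j : Nat) =>
      if h (i : Int) (j : Int) > 0 then acc + 1 else acc) acc) 0

-- ===== PRECONDITION & SPEC =====
-- Pre_ restricts to the problem's stated domain: a nonempty board whose rows are no longer than the
-- first row (one extra trailing cell per row is fine when there are no skills), and skills
-- [t,r1,c1,r2,c2,d] with t ∈ {1,2}, an in-range non-degenerate rectangle 0 ≤ r1 ≤ r2 < n,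
-- 0 ≤ c1 ≤ c2 < len(board[0]) that stays inside every board row it covers. Outside it A raises
-- (empty board, overlong rows, out-of-range corners) or — via Python negative-index wraparound,
-- inverted rectangles, unknown skill types or scratch-grid cells that exist only because a row is
-- longer than the first — A and B both produce accidental, unspecified values (or B raises);
-- neither behaviour is the function's meaning there.
def Pre_solution (board : List (List Int)) (skill : List (List Int)) : Prop :=
  board ≠ [] ∧
  ((∀ row ∈ board, row.length ≤ (board.headD []).length) ∨
    (skill = [] ∧ ∀ row ∈ board, row.length ≤ (board.headD []).length + 1)) ∧
  (∀ s ∈ skill, s.length = 6 ∧ (s.getD 0 0 = 1 ∨ s.getD 0 0 = 2) ∧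
     0 ≤ s.getD 1 0 ∧ s.getD 1 0 ≤ s.getD 3 0 ∧ s.getD 3 0 < (board.length : Int) ∧
     0 ≤ s.getD 2 0 ∧ s.getD 2 0 ≤ s.getD 4 0 ∧ s.getD 4 0 < ((board.headD []).length : Int) ∧
     (∀ i ∈ List.range board.length, s.getD 1 0 ≤ (i : Int) → (i : Int) ≤ s.getD 3 0 →
        s.getD 4 0 < ((board.getD i []).length : Int)))
instance (board : List (List Int)) (skill : List (List Int)) : Decidable (Pre_solution board skill) := by
  unfold Pre_solution; infer_instance

def pvWitness_solution : List (List Int) × List (List Int) := ([[1, 2], [3, 4]], [[1, 0, 0, 1, 1, 2]])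

def Spec_solution (board : List (List Int)) (skill : List (List Int)) (out : Int) : Prop := out = solution_alt board skill
instance (board : List (List Int)) (skill : List (List Int)) (out : Int) : Decidable (Spec_solution board skill out) := by unfold Spec_solution; infer_instance

-- ===== CLAIM (what is proved, stated in full; the proofs are below) =====
def Claim_equal_solution : Prop := ∀ (board : List (List Int)) (skill : List (List Int)), Dom_solution board skill → Pre_solution board skill → Spec_solution board skill (solution board skill)

-- ===== LEMMAS AND PROOFS =====

-- ---- proof-side function model of A's grid passes (the table computations are proved equal to it) ----
def pvASkill (g : Int → Int → Int) (s : List Int) : Int → Int → Int :=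
  match s with
  | [t, r1, c1, r2, c2, d] =>
    let g1 := pvBump g r1 c1 (if t = 2 then d else -d)
    let g2 := pvBump g1 r1 (c2+1) (if t = 1 then d else -d)
    let g3 := pvBump g2 (r2+1) c1 (if t = 1 then d else -d)
    pvBump g3 (r2+1) (c2+1) (if t = 2 then d else -d)
  | _ => g

def pvRowStep (m : Nat) (g : Int → Int → Int) (i : Int) : Int → Int → Int :=
  (List.range m).foldl (fun g (j : Nat) => let w := g i (j : Int); pvBump g (i+1) (j : Int) w) g

def pvRowPrefix (g : Int → Int → Int) (n m : Nat) : Int → Int → Int :=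
  (List.range n).foldl (fun g (i : Nat) => pvRowStep m g (i : Int)) g

def pvColStep (n : Nat) (g : Int → Int → Int) (j : Int) : Int → Int → Int :=
  (List.range n).foldl (fun g (i : Nat) => let w := g (i : Int) j; pvBump g (i : Int) (j+1) w) g

def pvColPrefix (g : Int → Int → Int) (n m : Nat) : Int → Int → Int :=
  (List.range m).foldl (fun g (j : Nat) => pvColStep n g (j : Int)) g

def pvReadTab (tab : List (List Int)) : Int → Int → Int :=
  fun x y => if 0 ≤ x ∧ 0 ≤ y then (tab.getD x.toNat []).getD y.toNat 0 else 0



-- ---- simulation: the table computations compute the function model ----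
def pvShape (n m : Nat) (t : List (List Int)) : Prop :=
  t.length = n+1 ∧ ∀ k, k < n+1 → (t.getD k []).length = m+1

theorem pvGetD_set (l : List (List Int)) (i : Nat) (a : List Int) (k : Nat) :
    (l.set i a).getD k [] = if i = k ∧ i < l.length then a else l.getD k [] := by
  rw [List.getD_eq_getElem?_getD, List.getD_eq_getElem?_getD, List.getElem?_set]
  by_cases h1 : i = k
  · subst h1
    by_cases h2 : i < l.length
    · simp [h2]
    · have h3 : l[i]? = none := List.getElem?_eq_none (by omega)
      simp [h2]
  · simp [h1]

theorem pvShape_addAt (n m : Nat) (t : List (List Int)) (h : pvShape n m t) (i j : Nat) (v : Int) :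
    pvShape n m (pvAddAt t i j v) := by
  obtain ⟨h1, h2⟩ := h
  refine ⟨by simpa [pvAddAt] using h1, ?_⟩
  intro k hk
  simp only [pvAddAt, pvGetD_set]
  split_ifs with hif
  · rw [List.length_set]
    exact h2 i (by omega)
  · exact h2 k hk

theorem pvReadTab_addAt (t : List (List Int)) (i j : Nat) (v : Int)
    (hi : i < t.length) (hj : j < (t.getD i []).length) :
    pvReadTab (pvAddAt t i j v) = pvBump (pvReadTab t) (i : Int) (j : Int) v := by
  funext x y
  simp only [pvReadTab, pvBump, pvAddAt, pvGetD_set]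
  by_cases hxy : 0 ≤ x ∧ 0 ≤ y
  · rw [if_pos hxy, if_pos hxy]
    obtain ⟨hx, hy⟩ := hxy
    by_cases hxi : i = x.toNat
    · rw [if_pos ⟨hxi, hi⟩]
      rw [List.getD_eq_getElem?_getD, List.getElem?_set]
      by_cases hyj : j = y.toNat
      · have hxv : x = (i : Int) := by omega
        have hyv : y = (j : Int) := by omega
        rw [if_pos hyj, if_pos (by omega : j < (t.getD i []).length), if_pos ⟨hxv, hyv⟩]
        simp only [Option.getD_some]
        rw [← hxi, ← hyj]
      · rw [if_neg hyj, if_neg (by omega : ¬ (x = (i : Int) ∧ y = (j : Int)))]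
        rw [← hxi, ← List.getD_eq_getElem?_getD]
    · rw [if_neg (by omega : ¬ (i = x.toNat ∧ i < t.length)),
        if_neg (by omega : ¬ (x = (i : Int) ∧ y = (j : Int)))]
  · rw [if_neg hxy, if_neg (by omega : ¬ (x = (i : Int) ∧ y = (j : Int))), if_neg hxy]

theorem pvReadTab_addAtI (t : List (List Int)) (i j : Int) (v : Int)
    (hi0 : 0 ≤ i) (hj0 : 0 ≤ j) (hi : i.toNat < t.length) (hj : j.toNat < (t.getD i.toNat []).length) :
    pvReadTab (pvAddAtI t i j v) = pvBump (pvReadTab t) i j v := by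
  simp only [pvAddAtI, if_pos (And.intro hi0 hj0)]
  rw [pvReadTab_addAt t i.toNat j.toNat v hi hj]
  congr 1 <;> omega

theorem pvShape_addAtI (n m : Nat) (t : List (List Int)) (h : pvShape n m t) (i j : Int) (v : Int) :
    pvShape n m (pvAddAtI t i j v) := by
  simp only [pvAddAtI]
  split_ifs
  · exact pvShape_addAt n m t h _ _ v
  · exact h

theorem pvGet_read (t : List (List Int)) (i j : Nat) : pvGet t i j = pvReadTab t (i : Int) (j : Int) := by
  simp [pvGet, pvReadTab]

theorem pvReadTab_zero (n m : Nat) :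
    pvReadTab (List.replicate (n+1) (List.replicate (m+1) (0 : Int))) = fun _ _ => 0 := by
  funext x y
  simp only [pvReadTab]
  split_ifs with h
  · have h1 : (List.replicate (n+1) (List.replicate (m+1) (0 : Int))).getD x.toNat []
        = if x.toNat < n + 1 then List.replicate (m+1) (0 : Int) else [] := by
      rw [List.getD_eq_getElem?_getD, List.getElem?_replicate]
      split_ifs <;> rfl
    rw [h1]
    split_ifs with h2
    · rw [List.getD_eq_getElem?_getD, List.getElem?_replicate]
      split_ifs <;> rfl
    · rfl
  · rfl

theorem pvShape_zero (n m : Nat) :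
    pvShape n m (List.replicate (n+1) (List.replicate (m+1) (0 : Int))) := by
  constructor
  · simp
  · intro k hk
    rw [List.getD_eq_getElem?_getD, List.getElem?_replicate, if_pos hk]
    simp

theorem pvFoldl_sim {α : Type} (P : List (List Int) → Prop) (l : List α)
    (F : List (List Int) → α → List (List Int)) (G : (Int → Int → Int) → α → (Int → Int → Int))
    (hstep : ∀ t a, a ∈ l → P t → P (F t a) ∧ pvReadTab (F t a) = G (pvReadTab t) a) :
    ∀ t, P t → P (l.foldl F t) ∧ pvReadTab (l.foldl F t) = l.foldl G (pvReadTab t) := by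
  induction l with
  | nil => intro t h; exact ⟨h, rfl⟩
  | cons a l ih =>
      intro t h
      obtain ⟨h1, h2⟩ := hstep t a (by simp) h
      obtain ⟨h3, h4⟩ := ih (fun t a ha hp => hstep t a (by simp [ha]) hp) (F t a) h1
      exact ⟨h3, by rw [List.foldl_cons, List.foldl_cons, h4, h2]⟩

theorem pvBump_apply (g : Int → Int → Int) (a b v x y : Int) :
    pvBump g a b v x y = g x y + (if x = a ∧ y = b then v else 0) := by
  simp only [pvBump]; split_ifs <;> omega

-- net effect of one skill row on one cell, as A's four difference-array corner writes
def pvDelta (s : List Int) (x y : Int) : Int :=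
  match s with
  | [t, r1, c1, r2, c2, d] =>
      (if x = r1 ∧ y = c1 then (if t = 2 then d else -d) else 0)
    + (if x = r1 ∧ y = c2+1 then (if t = 1 then d else -d) else 0)
    + (if x = r2+1 ∧ y = c1 then (if t = 1 then d else -d) else 0)
    + (if x = r2+1 ∧ y = c2+1 then (if t = 2 then d else -d) else 0)
  | _ => 0

-- net effect of one skill row on one cell, as B applies it
def pvContrib (s : List Int) (x y : Int) : Int :=
  match s with
  | [t, r1, c1, r2, c2, d] =>
      if r1 ≤ x ∧ x ≤ r2 ∧ c1 ≤ y ∧ y ≤ c2 then (if t = 2 then d else -d) else 0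
  | _ => 0

theorem pvASkill_apply (g : Int → Int → Int) (s : List Int) (x y : Int) :
    pvASkill g s x y = g x y + pvDelta s x y := by
  rcases s with _ | ⟨t, _ | ⟨r1, _ | ⟨c1, _ | ⟨r2, _ | ⟨c2, _ | ⟨d, _ | ⟨e, s⟩⟩⟩⟩⟩⟩⟩ <;>
    (simp only [pvASkill, pvDelta, pvBump_apply, Int.add_zero]; try ring)

theorem pvAFold (skill : List (List Int)) (g : Int → Int → Int) (x y : Int) :
    (skill.foldl pvASkill g) x y = g x y + (skill.map (fun s => pvDelta s x y)).sum := by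
  induction skill generalizing g with
  | nil => simp
  | cons s rest ih =>
      simp only [List.foldl_cons, List.map_cons, List.sum_cons, ih, pvASkill_apply]
      ring

theorem pvColFoldAux (i0 v a : Int) (k : Nat) (h : Int → Int → Int) (x y : Int) :
    ((List.range k).foldl (fun h (j : Nat) => pvBump h i0 (a + (j : Int)) v) h) x y
      = h x y + (if x = i0 ∧ a ≤ y ∧ y < a + (k : Int) then v else 0) := by
  induction k generalizing h with
  | zero =>
      simp only [List.range_zero, List.foldl_nil, Nat.cast_zero]
      split_ifs <;> omega
  | succ k ih =>
      rw [List.range_succ, List.foldl_append]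
      simp only [List.foldl_cons, List.foldl_nil, pvBump_apply, ih]
      push_cast
      split_ifs <;> omega

theorem pyRange_fold_bump (i0 v a b : Int) (h : Int → Int → Int) (x y : Int) :
    ((PySem.List.pyRange a b 1).foldl (fun h j => pvBump h i0 j v) h) x y
      = h x y + (if x = i0 ∧ a ≤ y ∧ y < b then v else 0) := by
  rw [PySem.List.pyRange_one, List.foldl_map, pvColFoldAux]
  by_cases hab : a ≤ b
  · have : a + ((b - a).toNat : Int) = b := by omega
    rw [this]
  · have : ((b - a).toNat : Int) = 0 := by omega
    rw [this]
    split_ifs <;> omega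

theorem pvRowFoldAux (v a c1 c2 : Int) (k : Nat) (h : Int → Int → Int) (x y : Int) :
    ((List.range k).foldl
        (fun h (i : Nat) => (PySem.List.pyRange c1 (c2+1) 1).foldl (fun h j => pvBump h (a + (i : Int)) j v) h) h) x y
      = h x y + (if a ≤ x ∧ x < a + (k : Int) ∧ c1 ≤ y ∧ y ≤ c2 then v else 0) := by
  induction k generalizing h with
  | zero =>
      simp only [List.range_zero, List.foldl_nil, Nat.cast_zero]
      split_ifs <;> omega
  | succ k ih =>
      rw [List.range_succ, List.foldl_append]
      simp only [List.foldl_cons, List.foldl_nil, pyRange_fold_bump, ih]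
      push_cast
      split_ifs <;> omega

theorem pvBSkill_apply (h : Int → Int → Int) (s : List Int) (x y : Int) :
    pvBSkill h s x y = h x y + pvContrib s x y := by
  rcases s with _ | ⟨t, _ | ⟨r1, _ | ⟨c1, _ | ⟨r2, _ | ⟨c2, _ | ⟨d, _ | ⟨e, s⟩⟩⟩⟩⟩⟩⟩ <;>
    simp only [pvBSkill, pvContrib, Int.add_zero]
  rw [PySem.List.pyRange_one (a := r1), List.foldl_map]
  rw [pvRowFoldAux]
  by_cases hr : r1 ≤ r2 + 1
  · have : r1 + ((r2 + 1 - r1).toNat : Int) = r2 + 1 := by omega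
    rw [this]
    split_ifs <;> omega
  · have : ((r2 + 1 - r1).toNat : Int) = 0 := by omega
    rw [this]
    split_ifs <;> omega

theorem pvBFold (skill : List (List Int)) (h : Int → Int → Int) (x y : Int) :
    (skill.foldl pvBSkill h) x y = h x y + (skill.map (fun s => pvContrib s x y)).sum := by
  induction skill generalizing h with
  | nil => simp
  | cons s rest ih =>
      simp only [List.foldl_cons, List.map_cons, List.sum_cons, ih, pvBSkill_apply]
      ring

theorem pvRowStep_apply (m : Nat) (g : Int → Int → Int) (i x y : Int) :
    pvRowStep m g i x y = if x = i+1 ∧ 0 ≤ y ∧ y < (m : Int) then g x y + g i y else g x y := by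
  induction m generalizing x y with
  | zero => simp [pvRowStep]
  | succ m ih =>
      simp only [pvRowStep] at ih ⊢
      rw [List.range_succ, List.foldl_append]
      simp only [List.foldl_cons, List.foldl_nil, pvBump_apply]
      rw [ih x y, ih i (m : Int)]
      have hne : ¬ ((i : Int) = i + 1 ∧ 0 ≤ (m : Int) ∧ (m : Int) < (m : Int)) := by omega
      rw [if_neg hne]
      by_cases hy : y = (m : Int)
      · subst hy; push_cast; split_ifs <;> omega
      · push_cast; split_ifs <;> omega

theorem pvColStep_apply (n : Nat) (g : Int → Int → Int) (j x y : Int) :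
    pvColStep n g j x y = if y = j+1 ∧ 0 ≤ x ∧ x < (n : Int) then g x y + g x j else g x y := by
  induction n generalizing x y with
  | zero => simp [pvColStep]
  | succ n ih =>
      simp only [pvColStep] at ih ⊢
      rw [List.range_succ, List.foldl_append]
      simp only [List.foldl_cons, List.foldl_nil, pvBump_apply]
      rw [ih x y, ih (n : Int) j]
      have hne : ¬ ((j : Int) = j + 1 ∧ 0 ≤ (n : Int) ∧ (n : Int) < (n : Int)) := by omega
      rw [if_neg hne]
      by_cases hx : x = (n : Int)
      · subst hx; push_cast; split_ifs <;> omega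
      · push_cast; split_ifs <;> omega

theorem pvRowPrefix_spec (g : Int → Int → Int) (m : Nat) (n : Nat) :
    (∀ (x : Nat) (y : Int), x ≤ n → 0 ≤ y → y < (m : Int) →
        pvRowPrefix g n m (x : Int) y = ∑ i ∈ Finset.range (x+1), g (i : Int) y)
    ∧ (∀ (x y : Int), ¬ (0 ≤ x ∧ x ≤ (n : Int) ∧ 0 ≤ y ∧ y < (m : Int)) →
        pvRowPrefix g n m x y = g x y) := by
  induction n with
  | zero =>
      constructor
      · intro x y hx h0 hm
        interval_cases x
        simp [pvRowPrefix]
      · intro x y _; simp [pvRowPrefix]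
  | succ n ih =>
      have hstep : ∀ x y : Int, pvRowPrefix g (n+1) m x y
          = if x = (n : Int) + 1 ∧ 0 ≤ y ∧ y < (m : Int)
            then pvRowPrefix g n m x y + pvRowPrefix g n m (n : Int) y
            else pvRowPrefix g n m x y := by
        intro x y
        simp only [pvRowPrefix, List.range_succ, List.foldl_append, List.foldl_cons, List.foldl_nil]
        exact pvRowStep_apply m _ (n : Int) x y
      constructor
      · intro x y hx h0 hm
        rcases Nat.lt_or_ge x (n+1) with hlt | hge
        · rw [hstep]
          have : ¬ ((x : Int) = (n : Int) + 1 ∧ 0 ≤ y ∧ y < (m : Int)) := by omega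
          rw [if_neg this]
          exact ih.1 x y (by omega) h0 hm
        · have hx1 : x = n + 1 := by omega
          subst hx1
          rw [hstep]
          have hc : ((n+1 : Nat) : Int) = (n : Int) + 1 := by push_cast; ring
          rw [if_pos ⟨hc, h0, hm⟩]
          rw [ih.2 ((n+1 : Nat) : Int) y (by omega), ih.1 n y (by omega) h0 hm,
            Finset.sum_range_succ (fun i => g (i : Int) y) (n+1)]
          push_cast
          ring
      · intro x y hout
        rw [hstep]
        by_cases hx1 : x = (n : Int) + 1
        · have : ¬ (x = (n : Int) + 1 ∧ 0 ≤ y ∧ y < (m : Int)) := by omega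
          rw [if_neg this]
          exact ih.2 x y (by omega)
        · rw [if_neg (by omega)]
          exact ih.2 x y (by omega)

theorem pvColPrefix_spec (g : Int → Int → Int) (n : Nat) (m : Nat) :
    (∀ (x : Int) (y : Nat), 0 ≤ x → x < (n : Int) → y ≤ m →
        pvColPrefix g n m x (y : Int) = ∑ j ∈ Finset.range (y+1), g x (j : Int))
    ∧ (∀ (x y : Int), ¬ (0 ≤ x ∧ x < (n : Int) ∧ 0 ≤ y ∧ y ≤ (m : Int)) →
        pvColPrefix g n m x y = g x y) := by
  induction m with
  | zero =>
      constructor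
      · intro x y h0 hn hy
        interval_cases y
        simp [pvColPrefix]
      · intro x y _; simp [pvColPrefix]
  | succ m ih =>
      have hstep : ∀ x y : Int, pvColPrefix g n (m+1) x y
          = if y = (m : Int) + 1 ∧ 0 ≤ x ∧ x < (n : Int)
            then pvColPrefix g n m x y + pvColPrefix g n m x (m : Int)
            else pvColPrefix g n m x y := by
        intro x y
        simp only [pvColPrefix, List.range_succ, List.foldl_append, List.foldl_cons, List.foldl_nil]
        exact pvColStep_apply n _ (m : Int) x y
      constructor
      · intro x y h0 hn hy
        rcases Nat.lt_or_ge y (m+1) with hlt | hge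
        · rw [hstep]
          have : ¬ ((y : Int) = (m : Int) + 1 ∧ 0 ≤ x ∧ x < (n : Int)) := by omega
          rw [if_neg this]
          exact ih.1 x y h0 hn (by omega)
        · have hy1 : y = m + 1 := by omega
          subst hy1
          rw [hstep]
          have hc : ((m+1 : Nat) : Int) = (m : Int) + 1 := by push_cast; ring
          rw [if_pos ⟨hc, h0, hn⟩]
          rw [ih.2 x ((m+1 : Nat) : Int) (by omega), ih.1 x m h0 hn (by omega),
            Finset.sum_range_succ (fun j => g x (j : Int)) (m+1)]
          push_cast
          ring
      · intro x y hout
        rw [hstep]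
        by_cases hy1 : y = (m : Int) + 1
        · have : ¬ (y = (m : Int) + 1 ∧ 0 ≤ x ∧ x < (n : Int)) := by omega
          rw [if_neg this]
          exact ih.2 x y (by omega)
        · rw [if_neg (by omega)]
          exact ih.2 x y (by omega)

theorem pvRowPrefix_zero (n m : Nat) : pvRowPrefix (fun _ _ => 0) n m = fun _ _ => 0 := by
  funext x y
  by_cases h : 0 ≤ x ∧ x ≤ (n : Int) ∧ 0 ≤ y ∧ y < (m : Int)
  · obtain ⟨hx, hxn, hy, hym⟩ := h
    have hx' : x = ((x.toNat : Nat) : Int) := by omega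
    rw [hx', (pvRowPrefix_spec _ m n).1 x.toNat y (by omega) hy hym]
    simp
  · exact (pvRowPrefix_spec _ m n).2 x y h

theorem pvColPrefix_zero (n m : Nat) : pvColPrefix (fun _ _ => 0) n m = fun _ _ => 0 := by
  funext x y
  by_cases h : 0 ≤ x ∧ x < (n : Int) ∧ 0 ≤ y ∧ y ≤ (m : Int)
  · obtain ⟨hx, hxn, hy, hym⟩ := h
    have hy' : y = ((y.toNat : Nat) : Int) := by omega
    rw [hy', (pvColPrefix_spec _ n m).1 x y.toNat hx hxn (by omega)]
    simp
  · exact (pvColPrefix_spec _ n m).2 x y h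

theorem sum_ite_point (k : Nat) (A c : Int) :
    (∑ i ∈ Finset.range k, if (i : Int) = A then c else 0) = if 0 ≤ A ∧ A < (k : Int) then c else 0 := by
  induction k with
  | zero =>
      simp only [Finset.range_zero, Finset.sum_empty, Nat.cast_zero]
      split_ifs <;> omega
  | succ k ih =>
      rw [Finset.sum_range_succ, ih]
      push_cast
      split_ifs <;> omega

theorem sum2_ite_point (k l : Nat) (A B c : Int) :
    (∑ x ∈ Finset.range k, ∑ y ∈ Finset.range l, if (x : Int) = A ∧ (y : Int) = B then c else 0)
      = if 0 ≤ A ∧ A < (k : Int) ∧ 0 ≤ B ∧ B < (l : Int) then c else 0 := by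
  have hin : ∀ x : Nat, (∑ y ∈ Finset.range l, if (x : Int) = A ∧ (y : Int) = B then c else 0)
      = if (x : Int) = A then (if 0 ≤ B ∧ B < (l : Int) then c else 0) else 0 := by
    intro x
    by_cases hx : (x : Int) = A
    · simp only [hx, true_and, sum_ite_point]
      simp
    · simp [hx]
  rw [Finset.sum_congr rfl (fun x _ => hin x), sum_ite_point]
  split_ifs <;> omega

theorem sum_list_sum (k : Nat) (l : List (List Int)) (f : List Int → Nat → Int) :
    (∑ i ∈ Finset.range k, (l.map (fun s => f s i)).sum)
      = (l.map (fun s => ∑ i ∈ Finset.range k, f s i)).sum := by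
  induction l with
  | nil => simp
  | cons s rest ih =>
      simp only [List.map_cons, List.sum_cons, ← ih, Finset.sum_add_distrib]

theorem pvList_six (s : List Int) (h : s.length = 6) :
    ∃ a b c d e f, s = [a, b, c, d, e, f] := by
  rcases s with _ | ⟨a, _ | ⟨b, _ | ⟨c, _ | ⟨d, _ | ⟨e, _ | ⟨f, _ | ⟨g, s⟩⟩⟩⟩⟩⟩⟩ <;>
    simp_all

theorem pvDelta_boxsum (t r1 c1 r2 c2 d : Int)
    (ht : t = 1 ∨ t = 2) (h1 : 0 ≤ r1) (h2 : r1 ≤ r2) (h3 : 0 ≤ c1) (h4 : c1 ≤ c2) (i j : Nat) :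
    (∑ x ∈ Finset.range (i+1), ∑ y ∈ Finset.range (j+1), pvDelta [t, r1, c1, r2, c2, d] (x : Int) (y : Int))
      = pvContrib [t, r1, c1, r2, c2, d] (i : Int) (j : Int) := by
  simp only [pvDelta, pvContrib]
  simp only [Finset.sum_add_distrib, sum2_ite_point]
  push_cast
  rcases ht with ht | ht <;> subst ht <;> norm_num <;> split_ifs <;> omega

theorem pvFoldl_congr {α β : Type} (l : List β) (f g : α → β → α) (a : α)
    (h : ∀ x ∈ l, ∀ acc, f acc x = g acc x) : l.foldl f a = l.foldl g a := by
  induction l generalizing a with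
  | nil => rfl
  | cons x xs ih =>
      rw [List.foldl_cons, List.foldl_cons, h x (by simp)]
      exact ih (g a x) (fun x hx acc => h x (by simp [hx]) acc)


theorem pvCell_eq (board : List (List Int)) (skill : List (List Int))
    (hsk : ∀ s ∈ skill, s.length = 6 ∧ (s.getD 0 0 = 1 ∨ s.getD 0 0 = 2) ∧
      0 ≤ s.getD 1 0 ∧ s.getD 1 0 ≤ s.getD 3 0 ∧ s.getD 3 0 < (board.length : Int) ∧
      0 ≤ s.getD 2 0 ∧ s.getD 2 0 ≤ s.getD 4 0 ∧ s.getD 4 0 < ((board.headD []).length : Int) ∧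
      (∀ i ∈ List.range board.length, s.getD 1 0 ≤ (i : Int) → (i : Int) ≤ s.getD 3 0 →
        s.getD 4 0 < ((board.getD i []).length : Int)))
    (i j : Nat) (hi : i < board.length) (hj : j < (board.headD []).length) :
    (board.getD i []).getD j 0
      + pvColPrefix (pvRowPrefix (skill.foldl pvASkill (fun _ _ => 0)) board.length (board.headD []).length)
          board.length (board.headD []).length (i : Int) (j : Int)
      = (skill.foldl pvBSkill (fun i j => (board.getD i.toNat []).getD j.toNat 0)) (i : Int) (j : Int) := by
  have htmp3 : pvColPrefix (pvRowPrefix (skill.foldl pvASkill (fun _ _ => 0)) board.length (board.headD []).length)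
          board.length (board.headD []).length (i : Int) (j : Int)
      = (skill.map (fun s => pvContrib s (i : Int) (j : Int))).sum := by
    rw [(pvColPrefix_spec _ board.length (board.headD []).length).1 (i : Int) j
      (by positivity) (by exact_mod_cast hi) (Nat.le_of_lt hj)]
    have hrowv : ∀ y ∈ Finset.range (j+1),
        pvRowPrefix (skill.foldl pvASkill (fun _ _ => 0)) board.length (board.headD []).length (i : Int) (y : Int)
          = ∑ x ∈ Finset.range (i+1), (skill.foldl pvASkill (fun _ _ => 0)) (x : Int) (y : Int) := by
      intro y hy
      exact (pvRowPrefix_spec _ (board.headD []).length board.length).1 i (y : Int)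
        (Nat.le_of_lt hi) (by positivity) (by simp at hy; exact_mod_cast (by omega : y < (board.headD []).length))
    rw [Finset.sum_congr rfl hrowv]
    have htmp1 : ∀ (x y : Nat), (skill.foldl pvASkill (fun _ _ => 0)) (x : Int) (y : Int)
        = (skill.map (fun s => pvDelta s (x : Int) (y : Int))).sum := by
      intro x y; rw [pvAFold]; simp
    calc (∑ y ∈ Finset.range (j+1), ∑ x ∈ Finset.range (i+1),
            (skill.foldl pvASkill (fun _ _ => 0)) (x : Int) (y : Int))
        = ∑ y ∈ Finset.range (j+1), ∑ x ∈ Finset.range (i+1),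
            (skill.map (fun s => pvDelta s (x : Int) (y : Int))).sum := by
          exact Finset.sum_congr rfl (fun y _ => Finset.sum_congr rfl (fun x _ => htmp1 x y))
      _ = ∑ y ∈ Finset.range (j+1),
            (skill.map (fun s => ∑ x ∈ Finset.range (i+1), pvDelta s (x : Int) (y : Int))).sum := by
          exact Finset.sum_congr rfl (fun y _ =>
            sum_list_sum (i+1) skill (fun s x => pvDelta s (x : Int) (y : Int)))
      _ = (skill.map (fun s => ∑ y ∈ Finset.range (j+1),
            ∑ x ∈ Finset.range (i+1), pvDelta s (x : Int) (y : Int))).sum := by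
          exact sum_list_sum (j+1) skill
            (fun s y => ∑ x ∈ Finset.range (i+1), pvDelta s (x : Int) (y : Int))
      _ = (skill.map (fun s => pvContrib s (i : Int) (j : Int))).sum := by
          apply congrArg
          apply List.map_congr_left
          intro s hs
          obtain ⟨hlen, ht, hr10, hr12, hr2n, hc10, hc12, hc2m, -⟩ := hsk s hs
          obtain ⟨t, r1, c1, r2, c2, d, rfl⟩ := pvList_six s hlen
          simp only [List.getD, List.getElem?_cons_zero, List.getElem?_cons_succ,
            Option.getD_some] at ht hr10 hr12 hr2n hc10 hc12 hc2m
          rw [Finset.sum_comm]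
          exact pvDelta_boxsum t r1 c1 r2 c2 d ht hr10 hr12 hc10 hc12 i j
  rw [htmp3, pvBFold]
  simp

-- ===== VERDICT (by name: the statement is the Claim_ definition above) =====
theorem pvAddAtI_read (n m : Nat) (t : List (List Int)) (hP : pvShape n m t) (i j : Int)
    (hi0 : 0 ≤ i) (hin : i ≤ (n : Int)) (hj0 : 0 ≤ j) (hjm : j ≤ (m : Int)) (v : Int) :
    pvReadTab (pvAddAtI t i j v) = pvBump (pvReadTab t) i j v := by
  obtain ⟨h1, h2⟩ := hP
  apply pvReadTab_addAtI
  · exact hi0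
  · exact hj0
  · omega
  · rw [h2 i.toNat (by omega)]; omega

theorem solution_spec : Claim_equal_solution := by
  intro board skill _ hpre
  obtain ⟨hne, hrows, hsk⟩ := hpre
  unfold Spec_solution
  simp only [solution, solution_alt]
  have hsim1 := pvFoldl_sim (pvShape board.length (board.headD []).length) skill pvASkillT pvASkill
    (by
      intro t s hs hP
      obtain ⟨hlen, ht, hr10, hr12, hr2n, hc10, hc12, hc2m, -⟩ := hsk s hs
      obtain ⟨ty, r1, c1, r2, c2, d, rfl⟩ := pvList_six s hlen
      simp only [List.getD, List.getElem?_cons_zero, List.getElem?_cons_succ,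
        Option.getD_some] at ht hr10 hr12 hr2n hc10 hc12 hc2m
      have hP1 := pvShape_addAtI board.length (board.headD []).length t hP r1 c1
        (if ty = 2 then d else -d)
      have hP2 := pvShape_addAtI board.length (board.headD []).length _ hP1 r1 (c2+1)
        (if ty = 1 then d else -d)
      have hP3 := pvShape_addAtI board.length (board.headD []).length _ hP2 (r2+1) c1
        (if ty = 1 then d else -d)
      have hP4 := pvShape_addAtI board.length (board.headD []).length _ hP3 (r2+1) (c2+1)
        (if ty = 2 then d else -d)
      refine ⟨by simpa only [pvASkillT] using hP4, ?_⟩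
      simp only [pvASkillT, pvASkill]
      rw [pvAddAtI_read board.length (board.headD []).length _ hP3 (r2+1) (c2+1)
            (by omega) (by omega) (by omega) (by omega),
          pvAddAtI_read board.length (board.headD []).length _ hP2 (r2+1) c1
            (by omega) (by omega) (by omega) (by omega),
          pvAddAtI_read board.length (board.headD []).length _ hP1 r1 (c2+1)
            (by omega) (by omega) (by omega) (by omega),
          pvAddAtI_read board.length (board.headD []).length _ hP r1 c1
            (by omega) (by omega) (by omega) (by omega)])
    _ (pvShape_zero board.length (board.headD []).length)
  obtain ⟨hP1, hr1⟩ := hsim1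
  rw [pvReadTab_zero] at hr1
  have hsim2 := pvFoldl_sim (pvShape board.length (board.headD []).length) (List.range board.length)
    (fun t (i : Nat) => (List.range (board.headD []).length).foldl
      (fun t (j : Nat) => pvAddAt t (i+1) j (pvGet t i j)) t)
    (fun g (i : Nat) => pvRowStep (board.headD []).length g (i : Int))
    (by
      intro t i hi hP
      have hi' : i < board.length := List.mem_range.mp hi
      have hinner := pvFoldl_sim (pvShape board.length (board.headD []).length)
        (List.range (board.headD []).length)
        (fun t (j : Nat) => pvAddAt t (i+1) j (pvGet t i j))
        (fun g (j : Nat) => let w := g (i : Int) (j : Int); pvBump g ((i : Int)+1) (j : Int) w)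
        (by
          intro t j hj hP
          have hj' : j < (board.headD []).length := List.mem_range.mp hj
          obtain ⟨h1, h2⟩ := hP
          refine ⟨pvShape_addAt board.length (board.headD []).length t ⟨h1, h2⟩ (i+1) j _, ?_⟩
          rw [pvReadTab_addAt t (i+1) j _ (by omega) (by rw [h2 (i+1) (by omega)]; omega)]
          rw [pvGet_read]
          push_cast
          rfl)
        t hP
      exact ⟨hinner.1, by rw [hinner.2]; rfl⟩)
    _ hP1
  obtain ⟨hP2, hr2⟩ := hsim2
  have hsim3 := pvFoldl_sim (pvShape board.length (board.headD []).length)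
    (List.range (board.headD []).length)
    (fun t (j : Nat) => (List.range board.length).foldl
      (fun t (i : Nat) => pvAddAt t i (j+1) (pvGet t i j)) t)
    (fun g (j : Nat) => pvColStep board.length g (j : Int))
    (by
      intro t j hj hP
      have hj' : j < (board.headD []).length := List.mem_range.mp hj
      have hinner := pvFoldl_sim (pvShape board.length (board.headD []).length)
        (List.range board.length)
        (fun t (i : Nat) => pvAddAt t i (j+1) (pvGet t i j))
        (fun g (i : Nat) => let w := g (i : Int) (j : Int); pvBump g (i : Int) ((j : Int)+1) w)
        (by
          intro t i hi hP
          have hi' : i < board.length := List.mem_range.mp hi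
          obtain ⟨h1, h2⟩ := hP
          refine ⟨pvShape_addAt board.length (board.headD []).length t ⟨h1, h2⟩ i (j+1) _, ?_⟩
          rw [pvReadTab_addAt t i (j+1) _ (by omega) (by rw [h2 i (by omega)]; omega)]
          rw [pvGet_read]
          push_cast
          rfl)
        t hP
      exact ⟨hinner.1, by rw [hinner.2]; rfl⟩)
    _ hP2
  obtain ⟨hP3, hr3⟩ := hsim3
  apply pvFoldl_congr
  intro i hi acc
  apply pvFoldl_congr
  intro j hj acc2
  have hi' : i < board.length := List.mem_range.mp hi
  have e : List.foldl (fun g (j : Nat) => pvColStep board.length g (j : Int))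
      (List.foldl (fun g (i : Nat) => pvRowStep (board.headD []).length g (i : Int))
        (List.foldl pvASkill (fun _ _ => 0) skill) (List.range board.length))
      (List.range (board.headD []).length)
      = pvColPrefix (pvRowPrefix (List.foldl pvASkill (fun _ _ => 0) skill)
          board.length (board.headD []).length) board.length (board.headD []).length := rfl
  rcases hrows with hrect | ⟨hsempty, hrect1⟩
  · have hrow : (board.getD i []).length ≤ (board.headD []).length := by
      have h1 : board.getD i [] ∈ board := by
        rw [List.getD_eq_getElem board [] hi']
        exact List.getElem_mem hi'
      exact hrect _ h1
    have hj' : j < (board.headD []).length := by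
      have := List.mem_range.mp hj
      omega
    rw [pvGet_read, hr3, hr2, hr1, e, pvCell_eq board skill hsk i j hi' hj']
  · subst hsempty
    rw [pvGet_read, hr3, hr2, hr1, e]
    simp only [List.foldl_nil, pvRowPrefix_zero, pvColPrefix_zero, Int.toNat_natCast, add_zero]
    rfl
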